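-- pv_equiv track=rewrite | github.com/TehanIsum/AdResearch_Classification_Model | src/classifier.py | _apply_keyword_corrections
-- ===== SOURCE A (Python) =====
-- from typing import Dict, Optional
--
-- def _apply_keyword_corrections(title_lower: str, ml_prediction: Dict) -> Dict:
--     result = ml_prediction.copy()
--
--     # Check for explicit gender keywords first (highest priority)
--     # Check female keywords FIRST since "women"/"womens" contains "men" as substring
--     has_female_keyword = any(word in title_lower for word in ['women', 'female', 'womens', "women's", 'girls', 'girl', 'ladies'])
--     has_male_keyword = any(word in title_lower for word in ['men', 'male', 'mens', "men's", 'boys', 'boy'])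
--
--     # Alcohol products
--     if any(word in title_lower for word in ['beer', 'alcohol', 'wine', 'vodka', 'whiskey', 'liquor', 'spirits', 'champagne']):
--         result['target_age_group'] = '18-39'
--         result['target_weather'] = 'sunny'
--
--         if has_female_keyword:
--             result['target_gender'] = 'Female'
--         elif has_male_keyword:
--             result['target_gender'] = 'Male'
--         else:
--             result['target_gender'] = 'Male'
--
--     # Vehicles
--     elif any(word in title_lower for word in ['car', 'vehicle', 'suv', 'truck', 'motorcycle', 'cruiser', 'auto', 'toyota', 'honda', 'ford']):
--         result['target_age_group'] = '40-64'
--         if has_female_keyword: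
--             result['target_gender'] = 'Female'
--         elif has_male_keyword:
--             result['target_gender'] = 'Male'
--         else:
--             result['target_gender'] = 'Male'
--
--     # Apply explicit gender keywords for all other products
--     # Check FEMALE first since "women" contains "men" as substring
--     elif has_female_keyword:
--         result['target_gender'] = 'Female'
--     elif has_male_keyword:
--         result['target_gender'] = 'Male'
--
--     return result
-- ===== SOURCE B (Python) =====
-- # One flat keyword->tag index scanned once into a set of tags, then the
-- # output fields are computed as optionals and applied in a single update loop.
-- _INDEX = (
--     [(w, 'alcohol') for w in ('beer', 'alcohol', 'wine', 'vodka', 'whiskey', 'liquor', 'spirits', 'champagne')]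
--     + [(w, 'vehicle') for w in ('car', 'vehicle', 'suv', 'truck', 'motorcycle', 'cruiser', 'auto', 'toyota', 'honda', 'ford')]
--     + [(w, 'female') for w in ('women', 'female', 'womens', "women's", 'girls', 'girl', 'ladies')]
--     + [(w, 'male') for w in ('men', 'male', 'mens', "men's", 'boys', 'boy')]
-- )
--
--
-- def _apply_keyword_corrections(title_lower: str, ml_prediction: dict) -> dict:
--     found = {tag for kw, tag in _INDEX if kw in title_lower}
--     age = '18-39' if 'alcohol' in found else '40-64' if 'vehicle' in found else None
--     weather = 'sunny' if 'alcohol' in found else None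
--     gender = ('Female' if 'female' in found else
--               'Male' if 'male' in found or age is not None else None)
--     result = ml_prediction.copy()
--     for key, value in (('target_age_group', age), ('target_weather', weather), ('target_gender', gender)):
--         if value is not None:
--             result[key] = value
--     return result
-- ===== Notes on version B (the rewrite author's own statement) =====
-- stated objective: alternative
-- what changed: Instead of four separate keyword scans feeding nested if/elif assignment branches, B makes one pass over a flat keyword-to-tag index collecting a set of matched tags, computes each output field (age, weather, gender) as an optional value from that set, and applies all updates in a single loop that skips None values.
import Mathlib
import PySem

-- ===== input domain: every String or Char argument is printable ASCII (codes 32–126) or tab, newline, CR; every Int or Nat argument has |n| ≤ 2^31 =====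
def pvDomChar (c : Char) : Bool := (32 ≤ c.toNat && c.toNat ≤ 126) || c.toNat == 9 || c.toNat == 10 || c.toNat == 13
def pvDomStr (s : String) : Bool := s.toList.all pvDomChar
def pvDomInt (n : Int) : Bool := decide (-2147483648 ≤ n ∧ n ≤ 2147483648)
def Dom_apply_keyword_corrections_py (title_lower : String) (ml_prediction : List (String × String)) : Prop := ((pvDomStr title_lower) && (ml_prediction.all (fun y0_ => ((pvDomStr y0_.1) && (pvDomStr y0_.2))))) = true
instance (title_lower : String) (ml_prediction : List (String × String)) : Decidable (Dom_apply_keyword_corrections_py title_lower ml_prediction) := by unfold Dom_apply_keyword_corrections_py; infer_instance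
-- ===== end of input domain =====

-- B replaces A's four separate keyword scans and nested if/elif assignments by one pass over a
-- flat keyword→tag index into a tag set, optional-valued fields, and a single update loop (simpler decomposition; same cost).
-- ===== PORT A =====
def apply_keyword_corrections_py (title_lower : String) (ml_prediction : List (String × String)) : List (String × String) :=
  let result := PySem.Dict.mk ml_prediction
  let has_female_keyword := (["women", "female", "womens", "women's", "girls", "girl", "ladies"]).any (fun word => PySem.Str.isIn word title_lower)
  let has_male_keyword := (["men", "male", "mens", "men's", "boys", "boy"]).any (fun word => PySem.Str.isIn word title_lower)
  if (["beer", "alcohol", "wine", "vodka", "whiskey", "liquor", "spirits", "champagne"]).any (fun word => PySem.Str.isIn word title_lower) then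
    let result := result.insert "target_age_group" "18-39"
    let result := result.insert "target_weather" "sunny"
    let result :=
      if has_female_keyword then result.insert "target_gender" "Female"
      else if has_male_keyword then result.insert "target_gender" "Male"
      else result.insert "target_gender" "Male"
    result.items
  else if (["car", "vehicle", "suv", "truck", "motorcycle", "cruiser", "auto", "toyota", "honda", "ford"]).any (fun word => PySem.Str.isIn word title_lower) then
    let result := result.insert "target_age_group" "40-64"
    let result :=
      if has_female_keyword then result.insert "target_gender" "Female"
      else if has_male_keyword then result.insert "target_gender" "Male"
      else result.insert "target_gender" "Male"
    result.items
  else if has_female_keyword then (result.insert "target_gender" "Female").items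
  else if has_male_keyword then (result.insert "target_gender" "Male").items
  else result.items

-- ===== PORT B =====
-- flat keyword → tag index (Source B's _INDEX)
def pvIndex : List (String × String) :=
  (["beer", "alcohol", "wine", "vodka", "whiskey", "liquor", "spirits", "champagne"]).map (fun w => (w, "alcohol"))
  ++ (["car", "vehicle", "suv", "truck", "motorcycle", "cruiser", "auto", "toyota", "honda", "ford"]).map (fun w => (w, "vehicle"))
  ++ (["women", "female", "womens", "women's", "girls", "girl", "ladies"]).map (fun w => (w, "female"))
  ++ (["men", "male", "mens", "men's", "boys", "boy"]).map (fun w => (w, "male"))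

def apply_keyword_corrections_py_alt (title_lower : String) (ml_prediction : List (String × String)) : List (String × String) :=
  let found : PySem.Set String := PySem.Set.ofList ((pvIndex.filter (fun p => PySem.Str.isIn p.1 title_lower)).map Prod.snd)
  let age : Option String := if PySem.Set.contains found "alcohol" then some "18-39" else if PySem.Set.contains found "vehicle" then some "40-64" else none
  let weather : Option String := if PySem.Set.contains found "alcohol" then some "sunny" else none
  let gender : Option String :=
    if PySem.Set.contains found "female" then some "Female"
    else if PySem.Set.contains found "male" || age.isSome then some "Male"
    else none
  let result := PySem.Dict.mk ml_prediction
  let result := ([("target_age_group", age), ("target_weather", weather), ("target_gender", gender)]).foldl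
    (fun r kv => match kv.2 with | some v => r.insert kv.1 v | none => r) result
  result.items

-- ===== PRECONDITION & SPEC =====
def Spec_apply_keyword_corrections_py (title_lower : String) (ml_prediction : List (String × String)) (out : List (String × String)) : Prop := out = apply_keyword_corrections_py_alt title_lower ml_prediction
instance (title_lower : String) (ml_prediction : List (String × String)) (out : List (String × String)) : Decidable (Spec_apply_keyword_corrections_py title_lower ml_prediction out) := by unfold Spec_apply_keyword_corrections_py; infer_instance

-- ===== CLAIM =====
def Claim_equal_apply_keyword_corrections_py : Prop := ∀ (title_lower : String) (ml_prediction : List (String × String)), Dom_apply_keyword_corrections_py title_lower ml_prediction → Spec_apply_keyword_corrections_py title_lower ml_prediction (apply_keyword_corrections_py title_lower ml_prediction)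

-- ===== LEMMAS AND PROOFS =====
-- membership of a tag in B's tag set equals an any-scan over that tag's keywords in the index
theorem pv_contains_tag (t : String) (tag : String) :
    PySem.Set.contains (PySem.Set.ofList ((pvIndex.filter (fun p => PySem.Str.isIn p.1 t)).map Prod.snd)) tag
    = ((pvIndex.filter (fun p => p.2 == tag)).map Prod.fst).any (fun w => PySem.Str.isIn w t) := by
  rw [Bool.eq_iff_iff, PySem.Set.contains_iff, PySem.Set.mem_ofList]
  simp only [List.mem_map, List.mem_filter, List.any_eq_true, beq_iff_eq]
  constructor
  · rintro ⟨p, ⟨hp, hin⟩, rfl⟩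
    exact ⟨p.1, ⟨p, ⟨hp, rfl⟩, rfl⟩, hin⟩
  · rintro ⟨w, ⟨p, ⟨hp, htag⟩, rfl⟩, hin⟩
    exact ⟨p, ⟨hp, hin⟩, htag⟩

theorem pv_alc (t : String) :
    PySem.Set.contains (PySem.Set.ofList ((pvIndex.filter (fun p => PySem.Str.isIn p.1 t)).map Prod.snd)) "alcohol"
    = (["beer", "alcohol", "wine", "vodka", "whiskey", "liquor", "spirits", "champagne"]).any (fun word => PySem.Str.isIn word t) := by
  rw [pv_contains_tag]; rfl

theorem pv_veh (t : String) :
    PySem.Set.contains (PySem.Set.ofList ((pvIndex.filter (fun p => PySem.Str.isIn p.1 t)).map Prod.snd)) "vehicle"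
    = (["car", "vehicle", "suv", "truck", "motorcycle", "cruiser", "auto", "toyota", "honda", "ford"]).any (fun word => PySem.Str.isIn word t) := by
  rw [pv_contains_tag]; rfl

theorem pv_fem (t : String) :
    PySem.Set.contains (PySem.Set.ofList ((pvIndex.filter (fun p => PySem.Str.isIn p.1 t)).map Prod.snd)) "female"
    = (["women", "female", "womens", "women's", "girls", "girl", "ladies"]).any (fun word => PySem.Str.isIn word t) := by
  rw [pv_contains_tag]; rfl

theorem pv_male (t : String) :
    PySem.Set.contains (PySem.Set.ofList ((pvIndex.filter (fun p => PySem.Str.isIn p.1 t)).map Prod.snd)) "male"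
    = (["men", "male", "mens", "men's", "boys", "boy"]).any (fun word => PySem.Str.isIn word t) := by
  rw [pv_contains_tag]; rfl

-- ===== VERDICT =====
theorem apply_keyword_corrections_py_spec : Claim_equal_apply_keyword_corrections_py := by
  intro title_lower ml_prediction _
  unfold Spec_apply_keyword_corrections_py
  simp only [apply_keyword_corrections_py, apply_keyword_corrections_py_alt,
    pv_alc, pv_veh, pv_fem, pv_male]
  split_ifs <;> simp_all [List.foldl]
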